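-- pv_equiv track=rewrite | github.com/aqandrew/mnemokinesis | pagereplacement.py | getEqualMin
-- ===== SOURCE A (Python) =====
-- def getEqualMin(li, equal_idx):
-- 	count = 0
-- 	minm = getMin(li)
-- 	equal_idx.append(minm)
-- 	for x in range(0, len(li)):
-- 		if x == minm:
-- 			continue
-- 		else:
-- 			if li[x] == li[minm]:
-- 				equal_idx.append(x)
-- 				count = 1
--
-- 	return count
--
-- def getMin(li):
-- 	minm = li[0]
--
-- 	for i in range(1, len(li)):
-- 		if li[i] < minm:
-- 			minm = li[i]
--
-- 	return li.index(minm)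
-- ===== SOURCE B (Python) =====
-- def getEqualMin(li, equal_idx):
--     minval = li[0]
--     idxs = [0]
--     for i in range(1, len(li)):
--         v = li[i]
--         if v < minval:
--             minval = v
--             idxs = [i]
--         elif v == minval:
--             idxs.append(i)
--     equal_idx.extend(idxs)
--     return 1 if len(idxs) > 1 else 0
-- ===== Notes on version B (the rewrite author's own statement) =====
-- stated objective: alternative
-- what changed: B keeps a running minimum and its index list in one traversal (reset list on a new minimum, append on a tie) instead of A's compute-min pass, then list.index pass, then a full rescan collecting equal indices; Pre_ excludes the empty list, on which both raise IndexError.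
import Mathlib
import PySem

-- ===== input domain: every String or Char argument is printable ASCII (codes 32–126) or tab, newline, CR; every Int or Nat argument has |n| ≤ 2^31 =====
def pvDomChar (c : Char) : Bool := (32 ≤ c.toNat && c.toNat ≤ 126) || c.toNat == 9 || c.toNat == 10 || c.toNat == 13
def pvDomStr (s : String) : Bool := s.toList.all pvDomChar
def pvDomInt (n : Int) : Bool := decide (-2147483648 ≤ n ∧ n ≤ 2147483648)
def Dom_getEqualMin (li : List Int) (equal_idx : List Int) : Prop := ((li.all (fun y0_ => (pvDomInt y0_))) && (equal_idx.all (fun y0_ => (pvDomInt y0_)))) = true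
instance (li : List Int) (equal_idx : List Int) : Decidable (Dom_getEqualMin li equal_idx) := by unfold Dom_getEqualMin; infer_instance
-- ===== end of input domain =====

-- B replaces A's three passes (min value, list.index, rescan) by one traversal keeping the running
-- minimum and its index list; the proved equivalence is about the RETURN value only — both A and B
-- also mutate equal_idx in place, appending the same indices in the same order.

-- ===== PORT A =====
-- helper getMin of A: hand-rolled min loop over indices 1..len-1, then li.index(minm)
def getMin (li : List Int) : Int :=
  match li with
  | [] => 0  -- li[0] raises IndexError; excluded by Pre_getEqualMin
  | h :: _ =>
    let minm := (PySem.List.pyRange 1 (li.length : Int) 1).foldl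
      (fun m i => if PySem.List.pyGetD li i 0 < m then PySem.List.pyGetD li i 0 else m) h
    (((PySem.List.index? li minm).getD 0 : Nat) : Int)

def getEqualMin (li : List Int) (equal_idx : List Int) : Int :=
  match li with
  | [] => 0  -- getMin raises IndexError here; excluded by Pre_getEqualMin
  | _ :: _ =>
    let minm := getMin li
    (PySem.List.pyRange 0 (li.length : Int) 1).foldl
      (fun count x =>
        if x == minm then count
        else if PySem.List.pyGetD li x 0 == PySem.List.pyGetD li minm 0 then 1 else count) 0

-- ===== PORT B =====
-- single pass: running minimum `minval`, its index list `idxs`, next index `i`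
def altGo (minval : Int) (idxs : List Int) (i : Int) : List Int → Int × List Int
  | [] => (minval, idxs)
  | v :: rest =>
    if v < minval then altGo v [i] (i + 1) rest
    else if v == minval then altGo minval (idxs ++ [i]) (i + 1) rest
    else altGo minval idxs (i + 1) rest

def getEqualMin_alt (li : List Int) (equal_idx : List Int) : Int :=
  match li with
  | [] => 0  -- li[0] raises IndexError; excluded by Pre_getEqualMin
  | h :: t =>
    let idxs := (altGo h [0] 1 t).2
    if 1 < idxs.length then 1 else 0

-- ===== PRECONDITION & SPEC =====
-- Pre_ excludes only the empty list, on which both Pythons raise IndexError.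
def Pre_getEqualMin (li : List Int) (equal_idx : List Int) : Prop := li ≠ []
instance (li : List Int) (equal_idx : List Int) : Decidable (Pre_getEqualMin li equal_idx) := by unfold Pre_getEqualMin; infer_instance
def pvWitness_getEqualMin : List Int × List Int := ([3, 1, 2, 1], [0])

def Spec_getEqualMin (li : List Int) (equal_idx : List Int) (out : Int) : Prop := out = getEqualMin_alt li equal_idx
instance (li : List Int) (equal_idx : List Int) (out : Int) : Decidable (Spec_getEqualMin li equal_idx out) := by unfold Spec_getEqualMin; infer_instance

-- ===== CLAIM (what is proved, stated in full; the proofs are below) =====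
def Claim_equal_getEqualMin : Prop := ∀ (li : List Int) (equal_idx : List Int), Dom_getEqualMin li equal_idx → Pre_getEqualMin li equal_idx → Spec_getEqualMin li equal_idx (getEqualMin li equal_idx)

-- ===== LEMMAS AND PROOFS =====

-- the min-combining step both loops use
def minf (m v : Int) : Int := if v < m then v else m

lemma foldl_minf_le_init : ∀ (t : List Int) (h : Int), t.foldl minf h ≤ h := by
  intro t
  induction t with
  | nil => intro h; simp
  | cons v r ih =>
    intro h
    have := ih (minf h v)
    have hm : minf h v ≤ h := by unfold minf; split <;> omega
    simpa using le_trans (by simpa using this) hm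

lemma foldl_minf_mem : ∀ (t : List Int) (h : Int), t.foldl minf h ∈ h :: t := by
  intro t
  induction t with
  | nil => intro h; simp
  | cons v r ih =>
    intro h
    have := ih (minf h v)
    simp only [List.foldl_cons]
    rcases List.mem_cons.mp this with h1 | h1
    · rw [show List.foldl minf (minf h v) r = minf h v from h1]
      unfold minf; split
      · simp
      · simp
    · simp [h1]

-- invariant of B's loop: the final index list has as many entries as the suffix minimum has
-- occurrences (plus the carried idxs when no strictly smaller element was found)
lemma altGo_len : ∀ (rest : List Int) (m : Int) (idxs : List Int) (i : Int),
    (altGo m idxs i rest).2.length =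
      if rest.foldl minf m < m then rest.count (rest.foldl minf m)
      else idxs.length + rest.count m := by
  intro rest
  induction rest with
  | nil => intro m idxs i; simp [altGo]
  | cons v r ih =>
    intro m idxs i
    simp only [altGo, List.foldl_cons]
    by_cases hv : v < m
    · have hmf : minf m v = v := by unfold minf; simp [hv]
      rw [if_pos hv, ih, hmf]
      have hle : r.foldl minf v ≤ v := foldl_minf_le_init r v
      by_cases h2 : r.foldl minf v < v
      · rw [if_pos h2, if_pos (lt_trans h2 hv)]
        have hne : v ≠ r.foldl minf v := by omega
        simp [List.count_cons, hne]
      · have heq : r.foldl minf v = v := by omega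
        rw [if_neg h2, if_pos (by omega : r.foldl minf v < m), heq]
        simp [List.count_cons]
        omega
    · have hmf : minf m v = m := by unfold minf; simp [hv]
      rw [if_neg hv, hmf]
      by_cases he : v = m
      · rw [if_pos (by simp [he]), ih]
        have hle : r.foldl minf m ≤ m := foldl_minf_le_init r m
        by_cases h2 : r.foldl minf m < m
        · rw [if_pos h2, if_pos h2]
          have hne : v ≠ r.foldl minf m := by omega
          simp [List.count_cons, hne]
        · rw [if_neg h2, if_neg h2]
          simp [List.count_cons, he]
          omega
      · rw [if_neg (by simp [he]), ih]
        have hle : r.foldl minf m ≤ m := foldl_minf_le_init r m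
        by_cases h2 : r.foldl minf m < m
        · rw [if_pos h2, if_pos h2]
          have hne : v ≠ r.foldl minf m := by omega
          simp [List.count_cons, hne]
        · rw [if_neg h2, if_neg h2]
          simp [List.count_cons, he]

-- B's index list counts exactly the occurrences of the minimum value
lemma altGo_len_top (h : Int) (t : List Int) :
    (altGo h [0] 1 t).2.length = (h :: t).count (t.foldl minf h) := by
  rw [altGo_len]
  have hle := foldl_minf_le_init t h
  by_cases h2 : t.foldl minf h < h
  · rw [if_pos h2]
    have hne : h ≠ t.foldl minf h := by omega
    simp [List.count_cons, hne]
  · have hM : t.foldl minf h = h := by omega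
    rw [if_neg h2, hM]
    simp [List.count_cons]
    omega

-- B returns 1 iff the minimum value occurs at least twice
lemma alt_eq_count (h : Int) (t : List Int) (e : List Int) :
    getEqualMin_alt (h :: t) e =
      if 1 < (h :: t).count (t.foldl minf h) then 1 else 0 := by
  simp only [getEqualMin_alt]
  rw [altGo_len_top]

-- generic shape of A's flag loop: the accumulator becomes 1 iff some element satisfies q
lemma foldl_flag (q : Int → Prop) [DecidablePred q] :
    ∀ (xs : List Int) (c : Int),
      xs.foldl (fun cnt x => if q x then 1 else cnt) c = if ∃ x ∈ xs, q x then 1 else c := by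
  intro xs
  induction xs with
  | nil => intro c; simp
  | cons a xs ih =>
    intro c
    simp only [List.foldl_cons]
    rw [ih]
    by_cases hx : ∃ x ∈ xs, q x <;> by_cases ha : q a <;> simp [hx, ha]

-- there is an index ≠ k holding value M iff M occurs at least twice (given li[k] = M)
lemma exists_other_iff_count (li : List Int) (M : Int) (k : Nat) (hk : k < li.length)
    (hkM : li[k] = M) :
    (∃ j : Nat, j < li.length ∧ j ≠ k ∧ li.getD j 0 = M) ↔ 1 < li.count M := by
  have hdrop : li.drop k = li[k] :: li.drop (k+1) := List.drop_eq_getElem_cons hk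
  have hsplit : li.count M = (li.take k).count M + (li.drop k).count M := by
    conv_lhs => rw [← List.take_append_drop k li]
    rw [List.count_append]
  have hdc : (li.drop k).count M = (li.drop (k+1)).count M + 1 := by
    rw [hdrop, List.count_cons]
    simp [hkM]
  constructor
  · rintro ⟨j, hj, hjk, hjM⟩
    have hgd : li[j] = M := by rw [← List.getD_eq_getElem li 0 hj]; exact hjM
    rcases Nat.lt_or_ge j k with hlt | hge
    · have hlen : j < (li.take k).length := by simp [List.length_take]; omega
      have hmem : M ∈ li.take k := by
        have heq : (li.take k)[j] = li[j] := List.getElem_take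
        rw [← hgd, ← heq]
        exact List.getElem_mem hlen
      have := List.count_pos_iff.mpr hmem
      omega
    · have hlen : j - (k+1) < (li.drop (k+1)).length := by simp [List.length_drop]; omega
      have hmem : M ∈ li.drop (k+1) := by
        have heq : (li.drop (k+1))[j-(k+1)] = li[(k+1) + (j-(k+1))] := List.getElem_drop
        have hidx : (k+1) + (j-(k+1)) = j := by omega
        simp only [hidx] at heq
        rw [← hgd, ← heq]
        exact List.getElem_mem hlen
      have := List.count_pos_iff.mpr hmem
      omega
  · intro hcnt
    have hcase : 0 < (li.take k).count M ∨ 0 < (li.drop (k+1)).count M := by omega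
    rcases hcase with hpos | hpos
    · obtain ⟨i, hi, hieq⟩ := List.mem_iff_getElem.mp (List.count_pos_iff.mp hpos)
      have hik : i < k := by simp [List.length_take] at hi; omega
      have hil : i < li.length := by omega
      have hval : li[i] = M := by
        have heq : (li.take k)[i] = li[i] := List.getElem_take
        rw [← heq]; exact hieq
      exact ⟨i, hil, by omega, by rw [List.getD_eq_getElem li 0 hil]; exact hval⟩
    · obtain ⟨i, hi, hieq⟩ := List.mem_iff_getElem.mp (List.count_pos_iff.mp hpos)
      have hjl : (k+1) + i < li.length := by simp [List.length_drop] at hi; omega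
      have hval : li[(k+1)+i] = M := by
        have heq : (li.drop (k+1))[i] = li[(k+1) + i] := List.getElem_drop
        rw [← heq]; exact hieq
      exact ⟨(k+1)+i, hjl, by omega, by rw [List.getD_eq_getElem li 0 hjl]; exact hval⟩

-- A returns 1 iff the minimum value occurs at least twice
lemma a_eq_count (h : Int) (t : List Int) (e : List Int) :
    getEqualMin (h :: t) e =
      if 1 < (h :: t).count (t.foldl minf h) then 1 else 0 := by
  have hMmem : t.foldl minf h ∈ h :: t := foldl_minf_mem t h
  have hfold : (PySem.List.pyRange 1 (((h :: t) : List Int).length : Int) 1).foldl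
      (fun m i => if PySem.List.pyGetD (h :: t) i 0 < m then PySem.List.pyGetD (h :: t) i 0 else m) h
      = t.foldl minf h := by
    rw [PySem.List.foldl_pyRange_pyGetD' (h :: t) 0 (fun m v => if v < m then v else m) h (by omega : (0:Int) ≤ 1)]
    rfl
  obtain ⟨k, hk⟩ : ∃ k, PySem.List.index? (h :: t) (t.foldl minf h) = some k := by
    have := (PySem.List.index?_isSome_iff (h :: t) (t.foldl minf h)).mpr hMmem
    exact Option.isSome_iff_exists.mp this
  obtain ⟨hklen, hkM, _⟩ := PySem.List.getElem_of_index?_eq_some hk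
  have hgm : getMin (h :: t) = ((k : Nat) : Int) := by
    simp only [getMin]
    rw [hfold, hk]
    rfl
  have hgetk : PySem.List.pyGetD (h :: t) ((k : Nat) : Int) 0 = t.foldl minf h := by
    rw [PySem.List.pyGetD_natCast]
    rw [List.getD_eq_getElem (h :: t) 0 hklen]
    exact hkM
  simp only [getEqualMin]
  rw [hgm]
  have hfun : (fun (count x : Int) =>
        if x == ((k : Nat) : Int) then count
        else if PySem.List.pyGetD (h :: t) x 0 == PySem.List.pyGetD (h :: t) ((k : Nat) : Int) 0
             then 1 else count)
      = (fun (count x : Int) =>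
        if (¬ (x = ((k : Nat) : Int)) ∧ PySem.List.pyGetD (h :: t) x 0 = t.foldl minf h)
        then 1 else count) := by
    funext c x
    rw [hgetk]
    by_cases h1 : x = ((k : Nat) : Int) <;>
      by_cases h2 : PySem.List.pyGetD (h :: t) x 0 = t.foldl minf h <;>
      simp [h1, h2]
  rw [hfun]
  rw [foldl_flag (fun x => ¬ (x = ((k : Nat) : Int)) ∧ PySem.List.pyGetD (h :: t) x 0 = t.foldl minf h)]
  have hiff : (∃ x ∈ PySem.List.pyRange 0 (((h :: t) : List Int).length : Int) 1,
        ¬ (x = ((k : Nat) : Int)) ∧ PySem.List.pyGetD (h :: t) x 0 = t.foldl minf h)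
      ↔ 1 < (h :: t).count (t.foldl minf h) := by
    rw [← exists_other_iff_count (h :: t) (t.foldl minf h) k hklen hkM]
    constructor
    · rintro ⟨x, hxmem, hxk, hxM⟩
      rw [PySem.List.mem_pyRange_one] at hxmem
      obtain ⟨hx0, hxlt⟩ := hxmem
      refine ⟨x.toNat, by omega, ?_, ?_⟩
      · intro hjeq; exact hxk (by omega)
      · have hxe : ((x.toNat : Nat) : Int) = x := by omega
        rw [← hxe, PySem.List.pyGetD_natCast] at hxM
        exact hxM
    · rintro ⟨j, hj, hjk, hjM⟩
      refine ⟨((j : Nat) : Int), ?_, ?_, ?_⟩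
      · rw [PySem.List.mem_pyRange_one]
        constructor
        · omega
        · omega
      · intro he
        exact hjk (by omega)
      · rw [PySem.List.pyGetD_natCast]
        exact hjM
  simp only [hiff]

-- ===== VERDICT (by name: the statement is the Claim_ definition above) =====
theorem getEqualMin_spec : Claim_equal_getEqualMin := by
  intro li e _ hpre
  match li with
  | [] => exact absurd rfl hpre
  | h :: t =>
    unfold Spec_getEqualMin
    rw [a_eq_count, alt_eq_count]
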